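-- pv_equiv track=rewrite | github.com/amitlisha/HexaGen | larc/dsl_minimalized.py | bounding_box_outline
-- ===== SOURCE A (Python) =====
-- def to_indices(
--     patch: frozenset
-- ) -> frozenset:
--     """ Strip colors from an object to get plain (row, col) indices. Pass-through if already indices. """
--     if len(patch) == 0:
--         return frozenset()
--     if isinstance(next(iter(patch))[1], tuple):
--         return frozenset(index for value, index in patch)
--     return patch
--
-- def get_boundary(
--     patch: frozenset,
--     side: str
-- ) -> int:
--     """ Return the boundary index of a patch (side: 'top', 'bottom', 'left', 'right'). """
--     indices = to_indices(patch)
--     if side == 'top':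
--         return min(i for i, j in indices)
--     elif side == 'bottom':
--         return max(i for i, j in indices)
--     elif side == 'left':
--         return min(j for i, j in indices)
--     elif side == 'right':
--         return max(j for i, j in indices)
--
-- def bounding_box_outline(
--     patch: frozenset,
--     offset: int = 0
-- ) -> frozenset:
--     """ Return the perimeter indices of the bounding box.
--     offset=0: exact bounding box outline.
--     offset=1: outline one cell inside (inbox).
--     offset=-1: outline one cell outside (outbox).
--     """
--     if len(patch) == 0:
--         return frozenset()
--     ai = get_boundary(patch, 'top') + offset
--     aj = get_boundary(patch, 'left') + offset
--     bi = get_boundary(patch, 'bottom') - offset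
--     bj = get_boundary(patch, 'right') - offset
--     si, sj = min(ai, bi), min(aj, bj)
--     ei, ej = max(ai, bi), max(aj, bj)
--     vlines = {(i, sj) for i in range(si, ei + 1)} | {(i, ej) for i in range(si, ei + 1)}
--     hlines = {(si, j) for j in range(sj, ej + 1)} | {(ei, j) for j in range(sj, ej + 1)}
--     return frozenset(vlines | hlines)
-- ===== SOURCE B (Python) =====
-- def _bbox(cells):
--     """Bounding box (top, bottom, left, right) by divide and conquer: split the
--     cells in half, box each half, merge the two boxes."""
--     if len(cells) == 1:
--         i, j = cells[0]
--         return (i, i, j, j)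
--     m = len(cells) // 2
--     t1, b1, l1, r1 = _bbox(cells[:m])
--     t2, b2, l2, r2 = _bbox(cells[m:])
--     return (min(t1, t2), max(b1, b2), min(l1, l2), max(r1, r2))
--
-- def bounding_box_outline(patch, offset=0):
--     """Compute the box once by recursive box-merging instead of four separate
--     boundary scans, then emit the outline."""
--     if len(patch) == 0:
--         return frozenset()
--     top, bottom, left, right = _bbox(list(patch))
--     ai = top + offset
--     aj = left + offset
--     bi = bottom - offset
--     bj = right - offset
--     si, sj = min(ai, bi), min(aj, bj)
--     ei, ej = max(ai, bi), max(aj, bj)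
--     vlines = {(i, sj) for i in range(si, ei + 1)} | {(i, ej) for i in range(si, ei + 1)}
--     hlines = {(si, j) for j in range(sj, ej + 1)} | {(ei, j) for j in range(sj, ej + 1)}
--     return frozenset(vlines | hlines)
-- ===== Notes on version B (the rewrite author's own statement) =====
-- stated objective: alternative
-- what changed: B replaces A's four get_boundary scans (each re-running to_indices and a fresh min/max generator pass) with a single recursive divide-and-conquer bounding-box computation that splits the cells in half and merges the two halves' boxes, then emits the same outline.
import Mathlib
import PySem

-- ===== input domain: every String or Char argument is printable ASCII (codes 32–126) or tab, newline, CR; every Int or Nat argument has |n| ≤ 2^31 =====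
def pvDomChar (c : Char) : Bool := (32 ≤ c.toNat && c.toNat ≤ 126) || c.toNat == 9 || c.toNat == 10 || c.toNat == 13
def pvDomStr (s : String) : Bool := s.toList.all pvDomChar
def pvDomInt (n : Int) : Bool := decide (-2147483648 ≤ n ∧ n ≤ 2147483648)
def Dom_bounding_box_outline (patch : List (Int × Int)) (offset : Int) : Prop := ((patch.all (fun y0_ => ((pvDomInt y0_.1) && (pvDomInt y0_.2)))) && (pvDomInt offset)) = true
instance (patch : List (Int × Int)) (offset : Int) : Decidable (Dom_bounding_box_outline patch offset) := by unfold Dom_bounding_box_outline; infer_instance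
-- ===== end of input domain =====

-- B computes the bounding box by one recursive divide-and-conquer box-merge instead of
-- A's four separate get_boundary min/max scans (objective: alternative).


-- ===== PORT A =====
-- to_indices: for (Int × Int) elements Python's isinstance(next(iter(patch))[1], tuple)
-- is always False, so the colored branch is dead and to_indices is the guarded pass-through.
def to_indices (patch : List (Int × Int)) : List (Int × Int) :=
  if patch.length = 0 then [] else patch

-- get_boundary: min/max of a generator; none models Python's ValueError on an empty
-- patch and the implicit None for an unknown side (both unreachable from A's call sites).
def get_boundary (patch : List (Int × Int)) (side : String) : Option Int :=
  let indices := to_indices patch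
  if side = "top" then PySem.List.min? (indices.map (fun p => p.1)) (fun y => y)
  else if side = "bottom" then PySem.List.max? (indices.map (fun p => p.1)) (fun y => y)
  else if side = "left" then PySem.List.min? (indices.map (fun p => p.2)) (fun y => y)
  else if side = "right" then PySem.List.max? (indices.map (fun p => p.2)) (fun y => y)
  else none

def bounding_box_outline (patch : List (Int × Int)) (offset : Int) : List (Int × Int) :=
  if patch.length = 0 then [] else
  match get_boundary patch "top", get_boundary patch "left",
        get_boundary patch "bottom", get_boundary patch "right" with
  | some t, some l, some b, some r =>
    let ai := t + offset
    let aj := l + offset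
    let bi := b - offset
    let bj := r - offset
    let si := min ai bi
    let sj := min aj bj
    let ei := max ai bi
    let ej := max aj bj
    let vlines := PySem.Set.union
      (PySem.Set.ofList ((PySem.List.pyRange si (ei+1) 1).map (fun i => (i, sj))))
      ((PySem.List.pyRange si (ei+1) 1).map (fun i => (i, ej)))
    let hlines := PySem.Set.union
      (PySem.Set.ofList ((PySem.List.pyRange sj (ej+1) 1).map (fun j => (si, j))))
      ((PySem.List.pyRange sj (ej+1) 1).map (fun j => (ei, j)))
    PySem.Set.ofList (PySem.Set.union vlines hlines)
  | _, _, _, _ => []   -- unreachable: min/max of a nonempty patch is some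

-- ===== PORT B =====
-- _bbox: divide and conquer; the [] case is unreachable (Python's _bbox is only called
-- on nonempty lists and would not terminate on []).
def bbox : List (Int × Int) → Int × Int × Int × Int
  | [] => (0, 0, 0, 0)
  | [c] => (c.1, c.1, c.2, c.2)
  | c :: c' :: cs =>
    let cells := c :: c' :: cs
    let m := cells.length / 2
    let (t1, b1, l1, r1) := bbox (cells.take m)
    let (t2, b2, l2, r2) := bbox (cells.drop m)
    (min t1 t2, max b1 b2, min l1 l2, max r1 r2)
termination_by cells => cells.length
decreasing_by
  · simp [List.length_take]; omega
  · simp [List.length_drop]; omega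

def bounding_box_outline_alt (patch : List (Int × Int)) (offset : Int) : List (Int × Int) :=
  if patch.length = 0 then [] else
  let (top, bottom, left, right) := bbox patch
  let ai := top + offset
  let aj := left + offset
  let bi := bottom - offset
  let bj := right - offset
  let si := min ai bi
  let sj := min aj bj
  let ei := max ai bi
  let ej := max aj bj
  let vlines := PySem.Set.union
    (PySem.Set.ofList ((PySem.List.pyRange si (ei+1) 1).map (fun i => (i, sj))))
    ((PySem.List.pyRange si (ei+1) 1).map (fun i => (i, ej)))
  let hlines := PySem.Set.union
    (PySem.Set.ofList ((PySem.List.pyRange sj (ej+1) 1).map (fun j => (si, j))))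
    ((PySem.List.pyRange sj (ej+1) 1).map (fun j => (ei, j)))
  PySem.Set.ofList (PySem.Set.union vlines hlines)

-- ===== PRECONDITION & SPEC =====
def Spec_bounding_box_outline (patch : List (Int × Int)) (offset : Int) (out : List (Int × Int)) : Prop := out = bounding_box_outline_alt patch offset
instance (patch : List (Int × Int)) (offset : Int) (out : List (Int × Int)) : Decidable (Spec_bounding_box_outline patch offset out) := by unfold Spec_bounding_box_outline; infer_instance

-- ===== CLAIM (what is proved, stated in full; the proofs are below) =====
def Claim_equal_bounding_box_outline : Prop := ∀ (patch : List (Int × Int)) (offset : Int), Dom_bounding_box_outline patch offset → Spec_bounding_box_outline patch offset (bounding_box_outline patch offset)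

-- ===== LEMMAS AND PROOFS =====

-- folding min/max from a seed commutes with taking the seed out
-- folding min/max from a seed commutes with taking the seed out
lemma foldl_min_pull (l : List Int) : ∀ (x y : Int),
    l.foldl min (min x y) = min x (l.foldl min y) := by
  induction l with
  | nil => intro x y; rfl
  | cons z t ih =>
      intro x y
      simp only [List.foldl_cons]
      rw [min_assoc, ih]

lemma foldl_max_pull (l : List Int) : ∀ (x y : Int),
    l.foldl max (max x y) = max x (l.foldl max y) := by
  induction l with
  | nil => intro x y; rfl
  | cons z t ih =>
      intro x y
      simp only [List.foldl_cons]
      rw [max_assoc, ih]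

def seedMin : List Int → Int
  | [] => 0
  | x :: t => t.foldl min x

def seedMax : List Int → Int
  | [] => 0
  | x :: t => t.foldl max x

lemma seedMin_append (a b : List Int) (ha : a ≠ []) (hb : b ≠ []) :
    seedMin (a ++ b) = min (seedMin a) (seedMin b) := by
  cases a with
  | nil => exact absurd rfl ha
  | cons x t =>
      cases b with
      | nil => exact absurd rfl hb
      | cons y u =>
          simp only [seedMin, List.cons_append, List.foldl_append, List.foldl_cons]
          rw [← foldl_min_pull u (t.foldl min x) y]

lemma seedMax_append (a b : List Int) (ha : a ≠ []) (hb : b ≠ []) :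
    seedMax (a ++ b) = max (seedMax a) (seedMax b) := by
  cases a with
  | nil => exact absurd rfl ha
  | cons x t =>
      cases b with
      | nil => exact absurd rfl hb
      | cons y u =>
          simp only [seedMax, List.cons_append, List.foldl_append, List.foldl_cons]
          rw [← foldl_max_pull u (t.foldl max x) y]

lemma bbox_eq : ∀ (cells : List (Int × Int)), cells ≠ [] →
    bbox cells = (seedMin (cells.map (fun p => p.1)), seedMax (cells.map (fun p => p.1)),
                  seedMin (cells.map (fun p => p.2)), seedMax (cells.map (fun p => p.2))) := by
  intro cells
  induction cells using bbox.induct with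
  | case1 => intro h; exact absurd rfl h
  | case2 c => intro _; simp [bbox, seedMin, seedMax]
  | case3 c c' cs cells m t1 b1 l1 r1 heq1 t2 b2 l2 r2 heq2 ih1 ih2 =>
      intro _
      have htake : (c :: c' :: cs).take ((c :: c' :: cs).length / 2) ≠ [] :=
        List.ne_nil_of_length_pos
          (by simp only [List.length_take, List.length_cons]; omega)
      have hdrop : (c :: c' :: cs).drop ((c :: c' :: cs).length / 2) ≠ [] :=
        List.ne_nil_of_length_pos
          (by simp only [List.length_drop, List.length_cons]; omega)
      rw [bbox, ih1 htake, ih2 hdrop]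
      have hsplit : ∀ f : Int × Int → Int,
          (c :: c' :: cs).map f
            = ((c :: c' :: cs).take ((c :: c' :: cs).length / 2)).map f
              ++ ((c :: c' :: cs).drop ((c :: c' :: cs).length / 2)).map f := by
        intro f
        rw [← List.map_append, List.take_append_drop]
      have hmt : ∀ f : Int × Int → Int,
          ((c :: c' :: cs).take ((c :: c' :: cs).length / 2)).map f ≠ [] := by
        intro f e
        exact htake (List.map_eq_nil_iff.mp e)
      have hmd : ∀ f : Int × Int → Int,
          ((c :: c' :: cs).drop ((c :: c' :: cs).length / 2)).map f ≠ [] := by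
        intro f e
        exact hdrop (List.map_eq_nil_iff.mp e)
      rw [hsplit (fun p => p.1), hsplit (fun p => p.2),
        seedMin_append _ _ (hmt _) (hmd _), seedMax_append _ _ (hmt _) (hmd _),
        seedMin_append _ _ (hmt _) (hmd _), seedMax_append _ _ (hmt _) (hmd _)]

-- ===== VERDICT (by name: the statement is the Claim_ definition above) =====
theorem bounding_box_outline_spec : Claim_equal_bounding_box_outline := by
  intro patch offset _
  unfold Spec_bounding_box_outline
  cases patch with
  | nil => rfl
  | cons p rest =>
      rw [bounding_box_outline_alt, bbox_eq (p :: rest) (by simp)]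
      simp only [bounding_box_outline, get_boundary, to_indices,
        List.length_cons, Nat.succ_ne_zero, if_false, String.reduceEq, reduceIte,
        List.map_cons, PySem.List.min?_id_cons, PySem.List.max?_id_cons, seedMin, seedMax]
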